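-- pv_equiv track=rewrite | github.com/WiluGIT/biometrics | ImageHistogramWindow.py | check_coloured
-- ===== SOURCE A (Python) =====
-- def check_coloured(pix_tuple):
--     counter = 0
--     for i in range(len(pix_tuple)):
--         if pix_tuple[i][0] == pix_tuple[i][1] == pix_tuple[i][2]:
--             counter += 1
--
--     if counter == len(pix_tuple):
--         return False
--
--     return True
-- ===== SOURCE B (Python) =====
-- def check_coloured(pix_tuple):
--     if not pix_tuple:
--         return False
--     r, g, b = zip(*pix_tuple)
--     return r != g or g != b
-- ===== Notes on version B (the rewrite author's own statement) =====
-- stated objective: alternative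
-- what changed: Instead of counting grayscale pixels per-pixel and comparing the count to the length, B transposes the pixel list into three whole channel sequences with zip(*...) and decides colouredness by comparing the channel sequences as tuples (r != g or g != b).
import Mathlib
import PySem

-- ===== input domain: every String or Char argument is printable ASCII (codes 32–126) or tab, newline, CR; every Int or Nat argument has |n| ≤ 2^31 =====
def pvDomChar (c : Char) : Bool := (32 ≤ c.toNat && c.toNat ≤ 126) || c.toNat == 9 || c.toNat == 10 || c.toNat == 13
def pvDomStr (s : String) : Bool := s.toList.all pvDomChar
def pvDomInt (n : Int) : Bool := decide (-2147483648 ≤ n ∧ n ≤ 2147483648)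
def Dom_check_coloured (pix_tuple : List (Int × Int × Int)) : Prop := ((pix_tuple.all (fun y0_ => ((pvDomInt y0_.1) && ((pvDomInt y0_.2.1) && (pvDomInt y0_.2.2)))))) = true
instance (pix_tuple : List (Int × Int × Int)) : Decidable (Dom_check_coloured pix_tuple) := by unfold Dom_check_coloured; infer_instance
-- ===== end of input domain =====

-- B transposes the pixels into three channel sequences (zip(*pix_tuple)) and compares those sequences, instead of A's per-pixel grayscale counter compared to the length (alternative decomposition, same cost).


-- ===== PORT A =====
-- Literal port of A: count pixels with equal channels via an index loop, then compare to len.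
def check_coloured (pix_tuple : List (Int × Int × Int)) : Bool :=
  let counter : Int :=
    (PySem.List.pyRange 0 (PySem.List.len pix_tuple) 1).foldl
      (fun c i =>
        let p := PySem.List.pyGetD pix_tuple i (0, 0, 0)
        if p.1 = p.2.1 ∧ p.2.1 = p.2.2 then c + 1 else c) 0
  if counter = PySem.List.len pix_tuple then false else true

-- ===== PORT B =====
-- B: transpose into three channel sequences (zip(*pix_tuple)) and compare the sequences.
def check_coloured_alt (pix_tuple : List (Int × Int × Int)) : Bool :=
  if pix_tuple.isEmpty then false
  else
    let r := pix_tuple.map (·.1)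
    let g := pix_tuple.map (·.2.1)
    let b := pix_tuple.map (·.2.2)
    !(r == g) || !(g == b)

-- ===== PRECONDITION & SPEC =====
def Spec_check_coloured (pix_tuple : List (Int × Int × Int)) (out : Bool) : Prop := out = check_coloured_alt pix_tuple
instance (pix_tuple : List (Int × Int × Int)) (out : Bool) : Decidable (Spec_check_coloured pix_tuple out) := by unfold Spec_check_coloured; infer_instance

-- ===== CLAIM (what is proved, stated in full; the proofs are below) =====
def Claim_equal_check_coloured : Prop := ∀ (pix_tuple : List (Int × Int × Int)), Dom_check_coloured pix_tuple → Spec_check_coloured pix_tuple (check_coloured pix_tuple)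

-- ===== LEMMAS AND PROOFS =====
-- The counter loop computes (start + number of grayscale pixels).
theorem counter_eq_countP (xs : List (Int × Int × Int)) (c : Int) :
    xs.foldl (fun c p => if p.1 = p.2.1 ∧ p.2.1 = p.2.2 then c + 1 else c) c
      = c + (xs.countP (fun p => decide (p.1 = p.2.1 ∧ p.2.1 = p.2.2)) : Int) := by
  induction xs generalizing c with
  | nil => simp
  | cons x xs ih =>
    simp only [List.foldl_cons, List.countP_cons, ih]
    by_cases h : x.1 = x.2.1 ∧ x.2.1 = x.2.2 <;> simp [h] <;> ring

-- ===== VERDICT (by name: the statement is the Claim_ definition above) =====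
theorem check_coloured_spec : Claim_equal_check_coloured := by
  intro xs _
  unfold Spec_check_coloured check_coloured check_coloured_alt
  rw [PySem.List.foldl_pyRange_zero_pyGetD xs (0,0,0)
        (fun c p => if p.1 = p.2.1 ∧ p.2.1 = p.2.2 then c + 1 else c) 0,
      counter_eq_countP]
  simp only [PySem.List.len_eq, zero_add]
  by_cases hall : ∀ p ∈ xs, p.1 = p.2.1 ∧ p.2.1 = p.2.2
  · have hc : xs.countP (fun p => decide (p.1 = p.2.1 ∧ p.2.1 = p.2.2)) = xs.length := by
      rw [List.countP_eq_length]; intro p hp; simpa using hall p hp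
    have hcast : ((xs.countP (fun p => decide (p.1 = p.2.1 ∧ p.2.1 = p.2.2)) : Int) = (xs.length : Int)) := by
      exact_mod_cast hc
    rw [if_pos hcast]
    by_cases hemp : xs.isEmpty
    · simp [hemp]
    · have hrg : xs.map (·.1) = xs.map (·.2.1) := by
        apply List.map_congr_left; intro p hp; exact (hall p hp).1
      have hgb : xs.map (·.2.1) = xs.map (·.2.2) := by
        apply List.map_congr_left; intro p hp; exact (hall p hp).2
      simp [hemp, hrg, hgb]
  · push Not at hall
    obtain ⟨p, hp, hne⟩ := hall
    have hc : xs.countP (fun p => decide (p.1 = p.2.1 ∧ p.2.1 = p.2.2)) < xs.length := by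
      apply lt_of_le_of_ne List.countP_le_length
      intro h
      obtain ⟨h1, h2⟩ : p.1 = p.2.1 ∧ p.2.1 = p.2.2 := by
        simpa using List.countP_eq_length.mp h p hp
      exact hne h1 h2
    have hne' : ((xs.countP (fun p => decide (p.1 = p.2.1 ∧ p.2.1 = p.2.2)) : Int) ≠ (xs.length : Int)) := by
      exact_mod_cast Nat.ne_of_lt hc
    rw [if_neg hne']
    have hemp : xs.isEmpty = false := by
      cases xs with
      | nil => cases hp
      | cons a t => rfl
    -- channels differ: if both map-equalities held, every pixel would be grayscale
    have hnotboth : ¬ (xs.map (·.1) = xs.map (·.2.1) ∧ xs.map (·.2.1) = xs.map (·.2.2)) := by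
      rintro ⟨hrg, hgb⟩
      have h1 := (List.map_eq_map_iff.mp hrg) p hp
      have h2 := (List.map_eq_map_iff.mp hgb) p hp
      exact hne h1 h2
    rw [if_neg (by simp [hemp])]
    by_cases hrg : xs.map (·.1) = xs.map (·.2.1)
    · have hgb : xs.map (·.2.1) ≠ xs.map (·.2.2) := fun h => hnotboth ⟨hrg, h⟩
      simp [hrg, hgb]
    · simp [hrg]
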